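-- pv_equiv track=rewrite | github.com/PacktPublishing/Advanced-Data-Structures-and-Algorithms-in-Python | Section 1/6_math.py | inclusion_exclusion
-- ===== SOURCE A (Python) =====
-- def inclusion_exclusion(n):
--     primes = [2, 3, 5, 7, 11, 13, 17, 19, 23, 29]
--
--     def count(k, primes_used):
--         if k == len(primes):
--             product = 1
--             for p in primes_used:
--                 product *= p * p
--             if len(primes_used) % 2 == 0:
--                 return n // product
--             return -(n // product)
--
--         return count(k + 1, primes_used) + \
--                count(k + 1, primes_used + [primes[k]])
--
--     return count(0, [])
-- ===== SOURCE B (Python) =====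
-- def inclusion_exclusion(n):
--     primes = [2, 3, 5, 7, 11, 13, 17, 19, 23, 29]
--     total = 0
--     for mask in range(1 << len(primes)):
--         product = 1
--         bits = 0
--         m = mask
--         for p in primes:
--             if m % 2 == 1:
--                 product *= p * p
--                 bits += 1
--             m //= 2
--         total += (n // product) if bits % 2 == 0 else -(n // product)
--     return total
-- ===== Notes on version B (the rewrite author's own statement) =====
-- stated objective: alternative
-- what changed: A's binary include/exclude tree recursion over the prime index is replaced by a single flat loop over all subset bitmasks, decoding each mask's bits to select the squared primes and accumulating the signed floor-division terms iteratively.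
import Mathlib
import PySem

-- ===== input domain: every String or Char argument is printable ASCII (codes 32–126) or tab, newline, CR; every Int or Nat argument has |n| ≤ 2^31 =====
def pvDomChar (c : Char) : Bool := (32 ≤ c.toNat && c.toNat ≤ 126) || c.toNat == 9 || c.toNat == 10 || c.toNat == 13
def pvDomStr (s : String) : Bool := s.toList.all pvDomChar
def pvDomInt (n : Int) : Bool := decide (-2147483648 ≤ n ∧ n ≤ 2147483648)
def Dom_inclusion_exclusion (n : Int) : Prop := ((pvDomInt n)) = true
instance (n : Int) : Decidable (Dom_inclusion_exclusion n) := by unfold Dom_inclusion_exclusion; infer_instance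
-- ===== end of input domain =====

-- B replaces A's binary include/exclude tree recursion by one flat iterative loop over all
-- bitmasks, decoding each mask's bits to pick the squared primes (objective: alternative).

-- ===== PORT A =====
-- A's count(k, primes_used) recurses on the index k into the fixed list `primes`;
-- the port carries `rest = primes.drop k` instead of k, so `primes[k]` is the head of `rest`.
def pvPrimesA : List Int := [2, 3, 5, 7, 11, 13, 17, 19, 23, 29]

def pvCount (n : Int) : List Int → List Int → Int
  | [], used =>
      let product := used.foldl (fun acc p => acc * (p * p)) 1
      if used.length % 2 = 0 then PySem.Int.floordiv n product
      else -(PySem.Int.floordiv n product)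
  | p :: rest, used => pvCount n rest used + pvCount n rest (used ++ [p])

def inclusion_exclusion (n : Int) : Int := pvCount n pvPrimesA []

-- ===== PORT B =====
def pvInnerB (st : Int × Int × Int) (p : Int) : Int × Int × Int :=
  let product := st.1
  let bits := st.2.1
  let m := st.2.2
  if PySem.Int.mod m 2 = 1 then (product * (p * p), bits + 1, PySem.Int.floordiv m 2)
  else (product, bits, PySem.Int.floordiv m 2)

def pvPrimesB : List Int := [2, 3, 5, 7, 11, 13, 17, 19, 23, 29]

def inclusion_exclusion_alt (n : Int) : Int :=
  -- 1 << len(primes) = 1024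
  (PySem.List.pyRange 0 1024 1).foldl
    (fun total mask =>
      let st := pvPrimesB.foldl pvInnerB (1, 0, mask)
      total + (if PySem.Int.mod st.2.1 2 = 0 then PySem.Int.floordiv n st.1
               else -(PySem.Int.floordiv n st.1)))
    0

-- ===== PRECONDITION & SPEC =====
def Spec_inclusion_exclusion (n : Int) (out : Int) : Prop := out = inclusion_exclusion_alt n
instance (n : Int) (out : Int) : Decidable (Spec_inclusion_exclusion n out) := by unfold Spec_inclusion_exclusion; infer_instance

-- ===== CLAIM (what is proved, stated in full; the proofs are below) =====
def Claim_equal_inclusion_exclusion : Prop := ∀ (n : Int), Dom_inclusion_exclusion n → Spec_inclusion_exclusion n (inclusion_exclusion n)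

-- ===== LEMMAS AND PROOFS =====

-- the subset of `ps` selected by the binary digits of `m` (least significant bit first)
def pvPick : Int → List Int → List Int
  | _, [] => []
  | m, p :: ps =>
      if PySem.Int.mod m 2 = 1 then p :: pvPick (PySem.Int.floordiv m 2) ps
      else pvPick (PySem.Int.floordiv m 2) ps

-- the inclusion-exclusion term for a chosen subset `used`
def pvTerm (n : Int) (used : List Int) : Int :=
  if used.length % 2 = 0 then PySem.Int.floordiv n (used.foldl (fun acc p => acc * (p * p)) 1)
  else -(PySem.Int.floordiv n (used.foldl (fun acc p => acc * (p * p)) 1))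

lemma pvPick_cons_even (t : Nat) (p : Int) (ps : List Int) :
    pvPick ((2 * t : Nat) : Int) (p :: ps) = pvPick (t : Int) ps := by
  have hm : PySem.Int.mod ((2 * t : Nat) : Int) 2 = 0 := by
    have := PySem.Int.mod_natCast (2 * t) 2
    simpa [Nat.mul_mod_right] using this
  have hd : PySem.Int.floordiv ((2 * t : Nat) : Int) 2 = (t : Int) := by
    have := PySem.Int.floordiv_natCast (2 * t) 2
    simpa [Nat.mul_div_cancel_left] using this
  simp only [pvPick]
  rw [hm, hd]
  norm_num

lemma pvPick_cons_odd (t : Nat) (p : Int) (ps : List Int) :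
    pvPick ((2 * t + 1 : Nat) : Int) (p :: ps) = p :: pvPick (t : Int) ps := by
  have hm : PySem.Int.mod ((2 * t + 1 : Nat) : Int) 2 = 1 := by
    have := PySem.Int.mod_natCast (2 * t + 1) 2
    simpa [Nat.mul_add_mod] using this
  have hd : PySem.Int.floordiv ((2 * t + 1 : Nat) : Int) 2 = (t : Int) := by
    have := PySem.Int.floordiv_natCast (2 * t + 1) 2
    have h2 : (2 * t + 1) / 2 = t := by omega
    simpa [h2] using this
  simp only [pvPick]
  rw [hm, hd]
  norm_num

-- B's inner loop computes the product of squares and the popcount of the picked subset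
lemma pvInnerB_foldl (ps : List Int) : ∀ (product bits m : Int), ∃ m',
    ps.foldl pvInnerB (product, bits, m) =
      ((pvPick m ps).foldl (fun acc p => acc * (p * p)) product,
       bits + ((pvPick m ps).length : Int), m') := by
  induction ps with
  | nil => intro product bits m; exact ⟨m, by simp [pvPick]⟩
  | cons p ps ih =>
      intro product bits m
      by_cases h : PySem.Int.mod m 2 = 1
      · obtain ⟨m', hm'⟩ := ih (product * (p * p)) (bits + 1) (PySem.Int.floordiv m 2)
        refine ⟨m', ?_⟩
        have hstep : pvInnerB (product, bits, m) p =
            (product * (p * p), bits + 1, PySem.Int.floordiv m 2) := by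
          simp only [pvInnerB]
          rw [if_pos h]
        have hpick : pvPick m (p :: ps) = p :: pvPick (PySem.Int.floordiv m 2) ps := by
          simp only [pvPick]
          rw [if_pos h]
        rw [List.foldl_cons, hstep, hm', hpick, List.foldl_cons]
        refine congrArg₂ _ rfl (congrArg₂ _ ?_ rfl)
        simp only [List.length_cons]
        push_cast
        ring
      · obtain ⟨m', hm'⟩ := ih product bits (PySem.Int.floordiv m 2)
        refine ⟨m', ?_⟩
        have hstep : pvInnerB (product, bits, m) p =
            (product, bits, PySem.Int.floordiv m 2) := by
          simp only [pvInnerB]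
          rw [if_neg h]
        have hpick : pvPick m (p :: ps) = pvPick (PySem.Int.floordiv m 2) ps := by
          simp only [pvPick]
          rw [if_neg h]
        rw [List.foldl_cons, hstep, hm', hpick]

-- even/odd split of a sum over range (2*N)
lemma pvRangeSplit (N : Nat) (f : Nat → Int) :
    ((List.range (2 * N)).map f).sum =
      ((List.range N).map (fun t => f (2 * t))).sum +
      ((List.range N).map (fun t => f (2 * t + 1))).sum := by
  induction N with
  | zero => simp
  | succ N ih =>
      have h : 2 * (N + 1) = (2 * N + 1) + 1 := by ring
      rw [h, List.range_succ, List.range_succ, List.range_succ]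
      simp only [List.map_append, List.sum_append, List.map_cons, List.map_nil,
        List.sum_cons, List.sum_nil, ih]
      ring

-- A's recursion sums the terms of all subsets of `ps`, indexed by bitmask
lemma pvCount_eq (n : Int) : ∀ (ps used : List Int),
    pvCount n ps used =
      ((List.range (2 ^ ps.length)).map
        (fun (t : Nat) => pvTerm n (used ++ pvPick (t : Int) ps))).sum := by
  intro ps
  induction ps with
  | nil =>
      intro used
      simp [pvCount, pvTerm, pvPick, List.range_succ]
  | cons p ps ih =>
      intro used
      have he : ((List.range (2 ^ ps.length)).map
          (fun (t : Nat) => pvTerm n (used ++ pvPick ((2 * t : Nat) : Int) (p :: ps)))).sum =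
          ((List.range (2 ^ ps.length)).map
          (fun (t : Nat) => pvTerm n (used ++ pvPick (t : Int) ps))).sum := by
        congr 1
        apply List.map_congr_left
        intro t _
        rw [pvPick_cons_even]
      have ho : ((List.range (2 ^ ps.length)).map
          (fun (t : Nat) => pvTerm n (used ++ pvPick ((2 * t + 1 : Nat) : Int) (p :: ps)))).sum =
          ((List.range (2 ^ ps.length)).map
          (fun (t : Nat) => pvTerm n ((used ++ [p]) ++ pvPick (t : Int) ps))).sum := by
        congr 1
        apply List.map_congr_left
        intro t _
        rw [pvPick_cons_odd]
        simp
      have hlen : 2 ^ (p :: ps).length = 2 * 2 ^ ps.length := by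
        simp [List.length_cons, pow_succ]; ring
      rw [show pvCount n (p :: ps) used
            = pvCount n ps used + pvCount n ps (used ++ [p]) from rfl,
        hlen, pvRangeSplit, he, ho, ih used, ih (used ++ [p])]

-- B's outer loop sums the same terms over all masks
set_option maxRecDepth 8192 in
lemma pvAlt_eq (n : Int) :
    inclusion_exclusion_alt n =
      ((List.range 1024).map (fun (t : Nat) => pvTerm n (pvPick (t : Int) pvPrimesB))).sum := by
  have h1 : ((1024:Int) - 0).toNat = 1024 := by simp
  unfold inclusion_exclusion_alt
  rw [PySem.List.pyRange_one, h1]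
  rw [PySem.List.foldl_add (g := fun mask =>
      let st := pvPrimesB.foldl pvInnerB (1, 0, mask)
      (if PySem.Int.mod st.2.1 2 = 0 then PySem.Int.floordiv n st.1
       else -(PySem.Int.floordiv n st.1)))]
  rw [List.map_map, zero_add]
  apply congrArg List.sum
  apply List.map_congr_left
  intro t _
  show (fun mask =>
      let st := pvPrimesB.foldl pvInnerB (1, 0, mask)
      (if PySem.Int.mod st.2.1 2 = 0 then PySem.Int.floordiv n st.1
       else -(PySem.Int.floordiv n st.1))) ((0:Int) + (t : Int)) = _
  rw [zero_add]
  obtain ⟨m', hm'⟩ := pvInnerB_foldl pvPrimesB 1 0 (t : Int)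
  simp only [hm', pvTerm, zero_add]
  have hpar : PySem.Int.mod ((pvPick (t : Int) pvPrimesB).length : Int) 2 = 0 ↔
      (pvPick (t : Int) pvPrimesB).length % 2 = 0 := by
    rw [show ((2:Int)) = (((2:Nat)):Int) by norm_num,
      PySem.Int.mod_natCast (pvPick (t : Int) pvPrimesB).length 2]
    omega
  by_cases h : (pvPick (t : Int) pvPrimesB).length % 2 = 0
  · rw [if_pos (hpar.mpr h), if_pos h]
  · rw [if_neg (fun hc => h (hpar.mp hc)), if_neg h]

-- ===== VERDICT (by name: the statement is the Claim_ definition above) =====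
theorem inclusion_exclusion_spec : Claim_equal_inclusion_exclusion := by
  intro n _
  show inclusion_exclusion n = inclusion_exclusion_alt n
  rw [inclusion_exclusion, pvCount_eq, pvAlt_eq]
  norm_num [pvPrimesA, pvPrimesB]
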